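-- pv_equiv track=rewrite | github.com/heyoeyo/muggled_dpt | lib/v31_swinv2/components/patch_merge.py | compute_patch_shape_per_merge
-- ===== SOURCE A (Python) =====
-- def compute_patch_shape_per_merge(base_patch_shape_hwc, num_merges):
--
--     '''
--     Function used to determine the output patch sizing (height x width x channels)
--     after some number of consecutive patch merging, which have the effect of halving
--     the spatial dimensions and doubling the channel count
--
--     Returns a list of shapes in hwc format
--     For example for input shape (8,8,64) and num_merges = 4:
--         [
--           [8,8,64],
--           [4,4,128],
--           [2,2,256],
--           [1,1,512]
--         ]
--     '''
--
--     # For convenience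
--     base_h, base_w, base_c = base_patch_shape_hwc
--
--     # Computer output patch shape for each (consequtive) patch merge
--     patch_shapes_hwc_per_merge = []
--     for n in range(num_merges):
--         doubling_factor = int(2 ** n)
--
--         out_h = base_h // doubling_factor
--         out_w = base_w // doubling_factor
--         out_c = int(base_c * doubling_factor)
--
--         patch_shapes_hwc_per_merge.append((out_h, out_w, out_c))
--
--     return patch_shapes_hwc_per_merge
-- ===== SOURCE B (Python) =====
-- def compute_patch_shape_per_merge(base_patch_shape_hwc, num_merges):
--     h, w, c = base_patch_shape_hwc
--     patch_shapes_hwc_per_merge = []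
--     for _ in range(num_merges):
--         patch_shapes_hwc_per_merge.append((h, w, c))
--         h //= 2
--         w //= 2
--         c *= 2
--     return patch_shapes_hwc_per_merge
-- ===== Notes on version B (the rewrite author's own statement) =====
-- stated objective: faster
-- what changed: Replaces the per-index closed form (base // 2**n, base_c * 2**n) with a running (h, w, c) state that is appended and then halved/doubled each iteration, removing the growing 2**n power computation.
import Mathlib
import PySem

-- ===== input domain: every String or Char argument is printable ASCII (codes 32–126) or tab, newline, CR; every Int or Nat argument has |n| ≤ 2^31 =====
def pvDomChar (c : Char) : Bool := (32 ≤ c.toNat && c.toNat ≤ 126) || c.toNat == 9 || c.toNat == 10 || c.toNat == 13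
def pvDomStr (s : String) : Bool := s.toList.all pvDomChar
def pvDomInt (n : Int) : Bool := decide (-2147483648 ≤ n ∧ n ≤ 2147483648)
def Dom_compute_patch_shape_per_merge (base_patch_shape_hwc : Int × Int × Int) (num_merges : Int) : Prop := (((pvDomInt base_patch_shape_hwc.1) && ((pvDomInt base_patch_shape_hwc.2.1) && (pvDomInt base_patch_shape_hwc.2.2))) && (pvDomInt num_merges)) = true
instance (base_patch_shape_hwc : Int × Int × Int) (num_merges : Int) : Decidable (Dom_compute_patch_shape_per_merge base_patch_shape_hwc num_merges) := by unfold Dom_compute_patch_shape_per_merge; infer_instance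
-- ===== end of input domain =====

-- B replaces A's per-index closed form (base // 2**n, base_c * 2**n) with a running (h, w, c)
-- state halved/doubled after each append; same output, no power computation (objective: simpler).


-- ===== PORT A =====
-- literal port of A: for n in range(num_merges), append (h//2**n, w//2**n, c*2**n)
def compute_patch_shape_per_merge (base_patch_shape_hwc : Int × Int × Int) (num_merges : Int) : List (Int × Int × Int) :=
  let base_h := base_patch_shape_hwc.1
  let base_w := base_patch_shape_hwc.2.1
  let base_c := base_patch_shape_hwc.2.2
  (PySem.List.pyRange 0 num_merges 1).foldl (fun acc n =>
    let doubling_factor : Int := 2 ^ n.toNat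
    acc ++ [(PySem.Int.floordiv base_h doubling_factor,
             PySem.Int.floordiv base_w doubling_factor,
             base_c * doubling_factor)]) []

-- ===== PORT B =====
-- literal port of B: running (h, w, c) state, appended then halved/doubled each step
def pvAltGo : Nat → Int → Int → Int → List (Int × Int × Int)
  | 0, _, _, _ => []
  | m + 1, h, w, c => (h, w, c) :: pvAltGo m (PySem.Int.floordiv h 2) (PySem.Int.floordiv w 2) (c * 2)

def compute_patch_shape_per_merge_alt (base_patch_shape_hwc : Int × Int × Int) (num_merges : Int) : List (Int × Int × Int) :=
  pvAltGo num_merges.toNat base_patch_shape_hwc.1 base_patch_shape_hwc.2.1 base_patch_shape_hwc.2.2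

-- ===== PRECONDITION & SPEC =====
def Spec_compute_patch_shape_per_merge (base_patch_shape_hwc : Int × Int × Int) (num_merges : Int) (out : List (Int × Int × Int)) : Prop := out = compute_patch_shape_per_merge_alt base_patch_shape_hwc num_merges
instance (base_patch_shape_hwc : Int × Int × Int) (num_merges : Int) (out : List (Int × Int × Int)) : Decidable (Spec_compute_patch_shape_per_merge base_patch_shape_hwc num_merges out) := by unfold Spec_compute_patch_shape_per_merge; infer_instance

-- ===== CLAIM (what is proved, stated in full; the proofs are below) =====
def Claim_equal_compute_patch_shape_per_merge : Prop := ∀ (base_patch_shape_hwc : Int × Int × Int) (num_merges : Int), Dom_compute_patch_shape_per_merge base_patch_shape_hwc num_merges → Spec_compute_patch_shape_per_merge base_patch_shape_hwc num_merges (compute_patch_shape_per_merge base_patch_shape_hwc num_merges)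

-- ===== LEMMAS AND PROOFS =====

-- iterated floor-halving: (h // 2) // 2^k = h // 2^(k+1)
lemma pv_fdiv_two_pow (h : Int) (k : Nat) :
    PySem.Int.floordiv (PySem.Int.floordiv h 2) (2 ^ k) = PySem.Int.floordiv h (2 ^ (k + 1)) := by
  rw [PySem.Int.floordiv_eq_ediv_of_pos (b := 2) (by omega),
      PySem.Int.floordiv_eq_ediv_of_pos (b := 2 ^ k) (by positivity),
      PySem.Int.floordiv_eq_ediv_of_pos (b := 2 ^ (k + 1)) (by positivity),
      Int.ediv_ediv_of_nonneg (by omega), pow_succ, mul_comm]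

-- B's loop computes the closed forms
lemma pvAltGo_eq (m : Nat) (h w c : Int) :
    pvAltGo m h w c = (List.range m).map
      (fun k => (PySem.Int.floordiv h (2 ^ k), PySem.Int.floordiv w (2 ^ k), c * 2 ^ k)) := by
  induction m generalizing h w c with
  | zero => rfl
  | succ m ih =>
    rw [List.range_succ_eq_map]
    simp only [pvAltGo, ih, List.map_cons, List.map_map]
    refine List.cons_eq_cons.mpr ⟨?_, ?_⟩
    · simp
    · apply List.map_congr_left
      intro k _
      simp only [Function.comp_apply, Nat.succ_eq_add_one, pv_fdiv_two_pow, pow_succ]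
      refine Prod.ext rfl (Prod.ext rfl ?_)
      dsimp only
      ring

-- ===== VERDICT (by name: the statement is the Claim_ definition above) =====
theorem compute_patch_shape_per_merge_spec : Claim_equal_compute_patch_shape_per_merge := by
  intro b n _
  unfold Spec_compute_patch_shape_per_merge compute_patch_shape_per_merge compute_patch_shape_per_merge_alt
  rw [pvAltGo_eq]
  have hfold := PySem.List.foldl_append_singleton_eq_map
    (fun k : Int => (PySem.Int.floordiv b.1 (2 ^ k.toNat),
                     PySem.Int.floordiv b.2.1 (2 ^ k.toNat),
                     b.2.2 * 2 ^ k.toNat)) (PySem.List.pyRange 0 n 1) []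
  simp only [List.nil_append] at hfold
  rw [hfold, PySem.List.pyRange_one, List.map_map, Int.sub_zero]
  apply List.map_congr_left
  intro k _
  simp
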